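-- pv_equiv track=rewrite | github.com/spmem/spmem | infer_stream.py | parse_action_string
-- ===== SOURCE A (Python) =====
-- KEY_MAP = {
--     'w': "W", 'a': "A", 's': "S", 'd': "D", 'v': "Reverse",
--     'i': "LookUp", 'j': "LookLeft", 'k': "LookDown", 'l': "LookRight",
-- }
--
-- def parse_action_string(action_str, default_frames=44):
--
--     tokens = action_str.strip().lower().split()
--     actions = []
--     i = 0
--     while i < len(tokens):
--         key = tokens[i]
--         direction = KEY_MAP.get(key)
--         if direction is None:
--             i += 1
--             continue
--         n = default_frames
--         if i + 1 < len(tokens):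
--             try:
--                 n = int(tokens[i + 1])
--                 i += 2
--             except ValueError:
--                 i += 1
--         else:
--             i += 1
--         actions.append((direction, n))
--     return actions
-- ===== SOURCE B (Python) =====
-- KEY_MAP = {
--     'w': "W", 'a': "A", 's': "S", 'd': "D", 'v': "Reverse",
--     'i': "LookUp", 'j': "LookLeft", 'k': "LookDown", 'l': "LookRight",
-- }
--
-- def parse_action_string(action_str, default_frames=44):
--     actions = []
--     pending = None
--     for tok in action_str.strip().lower().split():
--         if pending is not None:
--             try:
--                 actions.append((pending, int(tok)))
--                 pending = None
--                 continue
--             except ValueError: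
--                 actions.append((pending, default_frames))
--         pending = KEY_MAP.get(tok)
--     if pending is not None:
--         actions.append((pending, default_frames))
--     return actions
-- ===== Notes on version B (the rewrite author's own statement) =====
-- stated objective: alternative
-- what changed: Replaced the index-based while loop with variable +1/+2 jumps and lookahead by a single forward for-loop over tokens that carries the direction awaiting its count as state, emitting it on the next token or at a final flush.
import Mathlib
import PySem

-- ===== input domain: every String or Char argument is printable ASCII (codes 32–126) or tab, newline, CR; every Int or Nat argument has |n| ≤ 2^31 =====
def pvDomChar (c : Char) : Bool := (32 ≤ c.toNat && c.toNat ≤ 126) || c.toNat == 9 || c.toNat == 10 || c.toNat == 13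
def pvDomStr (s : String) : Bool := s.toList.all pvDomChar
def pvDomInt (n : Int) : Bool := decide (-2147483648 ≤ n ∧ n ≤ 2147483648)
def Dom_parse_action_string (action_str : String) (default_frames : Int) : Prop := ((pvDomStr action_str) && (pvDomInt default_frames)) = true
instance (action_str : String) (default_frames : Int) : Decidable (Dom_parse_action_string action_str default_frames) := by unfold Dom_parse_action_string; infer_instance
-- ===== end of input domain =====

-- B replaces A's index loop with ±1/±2 jumps by a forward loop carrying the awaited direction as state (alternative decomposition, same cost).

-- ===== PORT A =====
def pvKeyMap : PySem.Dict String String :=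
  (((((((((PySem.Dict.empty).insert "w" "W").insert "a" "A").insert "s" "S").insert "d" "D").insert "v" "Reverse").insert "i" "LookUp").insert "j" "LookLeft").insert "k" "LookDown").insert "l" "LookRight"

-- A's while loop over index i (termination: tokens.length - i decreases)
def pvALoop (tokens : List String) (default_frames : Int) (i : Nat) (actions : List (String × Int)) : List (String × Int) :=
  if h : i < tokens.length then
    let key := tokens[i]
    match pvKeyMap.get? key with
    | none => pvALoop tokens default_frames (i + 1) actions
    | some direction =>
      if h2 : i + 1 < tokens.length then
        match PySem.Int.ofStr? tokens[i + 1] with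
        | some n => pvALoop tokens default_frames (i + 2) (actions ++ [(direction, n)])
        | none => pvALoop tokens default_frames (i + 1) (actions ++ [(direction, default_frames)])
      else pvALoop tokens default_frames (i + 1) (actions ++ [(direction, default_frames)])
  else actions
termination_by tokens.length - i

def parse_action_string (action_str : String) (default_frames : Int) : List (String × Int) :=
  pvALoop (PySem.Str.split₀ (PySem.Str.lower (PySem.Str.strip action_str))) default_frames 0 []

-- ===== PORT B =====
-- B's for-loop: state = pending direction (Option) + accumulated actions
def pvBLoop (default_frames : Int) : List String → Option String → List (String × Int) → List (String × Int)
  | [], pending, actions =>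
    match pending with
    | some d => actions ++ [(d, default_frames)]
    | none => actions
  | tok :: rest, pending, actions =>
    match pending with
    | some d =>
      match PySem.Int.ofStr? tok with
      | some n => pvBLoop default_frames rest none (actions ++ [(d, n)])
      | none => pvBLoop default_frames rest (pvKeyMap.get? tok) (actions ++ [(d, default_frames)])
    | none => pvBLoop default_frames rest (pvKeyMap.get? tok) actions

def parse_action_string_alt (action_str : String) (default_frames : Int) : List (String × Int) :=
  pvBLoop default_frames (PySem.Str.split₀ (PySem.Str.lower (PySem.Str.strip action_str))) none []

-- ===== PRECONDITION & SPEC =====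
def Spec_parse_action_string (action_str : String) (default_frames : Int) (out : List (String × Int)) : Prop := out = parse_action_string_alt action_str default_frames
instance (action_str : String) (default_frames : Int) (out : List (String × Int)) : Decidable (Spec_parse_action_string action_str default_frames out) := by unfold Spec_parse_action_string; infer_instance

-- ===== CLAIM (what is proved, stated in full; the proofs are below) =====
def Claim_equal_parse_action_string : Prop := ∀ (action_str : String) (default_frames : Int), Dom_parse_action_string action_str default_frames → Spec_parse_action_string action_str default_frames (parse_action_string action_str default_frames)

-- ===== LEMMAS AND PROOFS =====

lemma pvDrop_cons (tokens : List String) (i : Nat) (h : i < tokens.length) :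
    tokens.drop i = tokens[i] :: tokens.drop (i + 1) := by
  exact (List.drop_eq_getElem_cons h)

-- key invariant: A's loop at index i equals B's loop on the remaining tokens with no pending direction
lemma pvLoop_agree_aux (tokens : List String) (default_frames : Int) :
    ∀ n i actions, tokens.length - i ≤ n → pvALoop tokens default_frames i actions
      = pvBLoop default_frames (tokens.drop i) none actions := by
  intro n
  induction n with
  | zero =>
    intro i actions h
    have hge : tokens.length ≤ i := by omega
    rw [pvALoop, List.drop_of_length_le hge]
    simp only [Nat.not_lt_of_le hge, dif_neg, not_false_iff]
    rfl
  | succ n IH =>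
    intro i actions h
    rw [pvALoop]
    by_cases hi : i < tokens.length
    · simp only [hi, dif_pos]
      rw [pvDrop_cons tokens i hi, pvBLoop]
      cases hk : pvKeyMap.get? tokens[i] with
      | none =>
        exact IH (i + 1) actions (by omega)
      | some direction =>
        by_cases h2 : i + 1 < tokens.length
        · simp only [h2, dif_pos]
          rw [pvDrop_cons tokens (i + 1) h2, pvBLoop]
          cases hn : PySem.Int.ofStr? tokens[i + 1] with
          | some m =>
            exact IH (i + 2) (actions ++ [(direction, m)]) (by omega)
          | none =>
            rw [IH (i + 1) (actions ++ [(direction, default_frames)]) (by omega),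
              pvDrop_cons tokens (i + 1) h2, pvBLoop]
        · simp only [h2, dif_neg, not_false_iff]
          rw [IH (i + 1) (actions ++ [(direction, default_frames)]) (by omega),
            List.drop_of_length_le (by omega : tokens.length ≤ i + 1)]
          rfl
    · simp only [hi, dif_neg, not_false_iff]
      rw [List.drop_of_length_le (Nat.le_of_not_lt hi)]
      rfl

lemma pvLoop_agree (tokens : List String) (default_frames : Int) (i : Nat)
    (actions : List (String × Int)) :
    pvALoop tokens default_frames i actions
      = pvBLoop default_frames (tokens.drop i) none actions :=
  pvLoop_agree_aux tokens default_frames tokens.length i actions (Nat.sub_le _ _)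

-- ===== VERDICT (by name: the statement is the Claim_ definition above) =====
theorem parse_action_string_spec : Claim_equal_parse_action_string := by
  intro action_str default_frames _
  unfold Spec_parse_action_string parse_action_string parse_action_string_alt
  exact pvLoop_agree _ default_frames 0 []
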